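-- pv_equiv track=rewrite | github.com/Arsen1302/Code-copy-detector | TestData/solutions/problem_467_1.py | solution_467_1
-- ===== SOURCE A (Python) =====
-- def solution_467_1(S, E):
--     L, R, X = 0, 0, 0
--     for i, j in zip(S, E):
--         L += (j == 'L')
--         R += (i == 'R')
--         if i == 'R' and L: return False
--         if j == 'L' and R: return False
--         L -= (i == 'L')
--         R -= (j == 'R')
--         if L < 0 or R < 0: return False
--         X += (i == 'X') - (j == 'X')
--     return X == 0
-- ===== SOURCE B (Python) =====
-- def _ok(a, b, inc, blk):
--     # stack of pending, not-yet-matched `inc` characters contributed by b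
--     pending = []
--     for x, y in zip(a, b):
--         if y == inc:
--             pending.append(y)
--         if x == blk and pending:
--             return False
--         if x == inc:
--             if not pending:
--                 return False
--             pending.pop()
--     return True
--
-- def solution_467_1(S, E):
--     n = min(len(S), len(E))
--     s, e = S[:n], E[:n]
--     if sum(x == 'X' for x in s) != sum(y == 'X' for y in e):
--         return False
--     return _ok(s, e, 'L', 'R') and _ok(e, s, 'R', 'L')
-- ===== Notes on version B (the rewrite author's own statement) =====
-- stated objective: alternative
-- what changed: Replaces A's fused single pass over three interleaved integer counters with an X-balance check plus one symmetric stack-based matcher (a pending-stack of unmatched characters) run twice with the roles of the two strings and of 'L'/'R' swapped.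
import Mathlib
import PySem

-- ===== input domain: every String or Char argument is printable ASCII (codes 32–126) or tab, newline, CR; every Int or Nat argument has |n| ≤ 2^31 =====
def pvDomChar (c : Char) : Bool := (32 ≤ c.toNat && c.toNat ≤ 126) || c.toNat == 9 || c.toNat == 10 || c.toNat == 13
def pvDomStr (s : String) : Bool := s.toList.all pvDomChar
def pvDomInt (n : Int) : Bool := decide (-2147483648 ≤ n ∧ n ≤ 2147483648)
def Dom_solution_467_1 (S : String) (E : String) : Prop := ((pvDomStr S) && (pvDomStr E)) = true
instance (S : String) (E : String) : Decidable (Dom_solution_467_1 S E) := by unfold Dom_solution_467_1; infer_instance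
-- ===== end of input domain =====

-- B replaces A's fused three-counter single pass by an X-balance comparison plus one
-- symmetric stack-based matcher applied twice with the strings' and 'L'/'R' roles swapped
-- (objective: alternative; same asymptotic cost).

-- ===== PORT A =====
-- A's loop over zip(S, E) carrying the counters L, R, X, with A's early returns.
def solution467Loop : List (Char × Char) → Int → Int → Int → Bool
  | [], _, _, X => decide (X = 0)
  | (i, j) :: rest, L, R, X =>
    let L1 := L + (if j = 'L' then 1 else 0)
    let R1 := R + (if i = 'R' then 1 else 0)
    if i = 'R' ∧ L1 ≠ 0 then false
    else if j = 'L' ∧ R1 ≠ 0 then false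
    else
      let L2 := L1 - (if i = 'L' then 1 else 0)
      let R2 := R1 - (if j = 'R' then 1 else 0)
      if L2 < 0 ∨ R2 < 0 then false
      else solution467Loop rest L2 R2 (X + (if i = 'X' then 1 else 0) - (if j = 'X' then 1 else 0))

def solution_467_1 (S : String) (E : String) : Bool :=
  solution467Loop (S.toList.zip E.toList) 0 0 0

-- ===== PORT B =====
-- B's helper `_ok(a, b, inc, blk)`: loop over zip(a, b) carrying the stack `pending`.
def okLoop (inc blk : Char) : List (Char × Char) → List Char → Bool
  | [], _ => true
  | (x, y) :: rest, pending =>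
    let p1 := if y = inc then pending ++ [y] else pending
    if x = blk ∧ ¬ p1.isEmpty then false
    else if x = inc then
      if p1.isEmpty then false
      else okLoop inc blk rest p1.dropLast
    else okLoop inc blk rest p1

-- B's `sum(x == 'X' for x in s)`
def xcount (l : List Char) : Int :=
  l.foldl (fun acc ch => if ch = 'X' then acc + 1 else acc) 0

def solution_467_1_alt (S : String) (E : String) : Bool :=
  let n : Int := min (PySem.Str.len S) (PySem.Str.len E)
  let s := PySem.Str.slice S none (some n)
  let e := PySem.Str.slice E none (some n)
  if xcount s.toList ≠ xcount e.toList then false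
  else okLoop 'L' 'R' (s.toList.zip e.toList) [] && okLoop 'R' 'L' (e.toList.zip s.toList) []

-- ===== PRECONDITION & SPEC =====
def Spec_solution_467_1 (S : String) (E : String) (out : Bool) : Prop := out = solution_467_1_alt S E
instance (S : String) (E : String) (out : Bool) : Decidable (Spec_solution_467_1 S E out) := by unfold Spec_solution_467_1; infer_instance

-- ===== CLAIM (what is proved, stated in full; the proofs are below) =====
def Claim_equal_solution_467_1 : Prop := ∀ (S : String) (E : String), Dom_solution_467_1 S E → Spec_solution_467_1 S E (solution_467_1 S E)

-- ===== LEMMAS AND PROOFS =====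

-- A counter-level description of B's stack matcher: only the stack HEIGHT matters.
def okCnt (inc blk : Char) : List (Char × Char) → Int → Bool
  | [], _ => true
  | (x, y) :: rest, d =>
    let d1 := d + (if y = inc then 1 else 0)
    if x = blk ∧ d1 ≠ 0 then false
    else if x = inc then
      if d1 = 0 then false else okCnt inc blk rest (d1 - 1)
    else okCnt inc blk rest d1

-- the running X-difference A's loop accumulates
def xsum : List (Char × Char) → Int
  | [] => 0
  | (i, j) :: rest => (if i = 'X' then 1 else 0) - (if j = 'X' then 1 else 0) + xsum rest

theorem okLoop_eq_okCnt (inc blk : Char) (z : List (Char × Char)) :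
    ∀ (p : List Char), okLoop inc blk z p = okCnt inc blk z (p.length : Int) := by
  induction z with
  | nil => intro p; rfl
  | cons hd rest ih =>
    intro p
    obtain ⟨x, y⟩ := hd
    simp only [okLoop, okCnt]
    by_cases hy : y = inc <;>
      simp [hy, List.isEmpty_iff_length_eq_zero] <;>
      by_cases hx2 : x = inc <;>
      by_cases hxb : x = blk <;>
      (try simp_all [ih, List.length_dropLast]) <;>
      first
        | rfl
        | (intros; omega)
        | (intro h; exfalso; omega)
        | (rcases p with _ | ⟨a, as⟩ <;> simp_all <;> congr 1 <;> push_cast <;> ring)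

-- A's fused pass is the conjunction of the two okCnt passes and the X-balance,
-- for any nonnegative starting counters.
theorem solution467Loop_eq (z : List (Char × Char)) :
    ∀ (L R x : Int), 0 ≤ L → 0 ≤ R →
    solution467Loop z L R x =
      (okCnt 'L' 'R' z L && okCnt 'R' 'L' (z.map Prod.swap) R && decide (x + xsum z = 0)) := by
  induction z with
  | nil => intro L R x hL hR; simp [solution467Loop, okCnt, xsum]
  | cons hd rest ih =>
    intro L R x hL hR
    obtain ⟨i, j⟩ := hd
    have eL1 : decide (L + 1 = 0) = false := decide_eq_false (by omega)
    have eL2 : decide (L + 1 < 0) = false := decide_eq_false (by omega)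
    have eL3 : decide (L < 0) = false := decide_eq_false (by omega)
    have eR1 : decide (R + 1 = 0) = false := decide_eq_false (by omega)
    have eR2 : decide (R + 1 < 0) = false := decide_eq_false (by omega)
    have eR3 : decide (R < 0) = false := decide_eq_false (by omega)
    by_cases hiR : i = 'R' <;> by_cases hiL : i = 'L' <;>
      by_cases hjL : j = 'L' <;> by_cases hjR : j = 'R' <;>
      first
      | (exact absurd (hiR.symm.trans hiL) (by decide))
      | (exact absurd (hjL.symm.trans hjR) (by decide))
      | (simp only [solution467Loop, okCnt, xsum, List.map_cons, Prod.swap_prod_mk]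
         simp [hiR, hiL, hjL, hjR, eL1, eL2, eL3, eR1, eR2, eR3]
         all_goals (try by_cases hL0 : L = 0 <;> simp [hL0])
         all_goals (try by_cases hR0 : R = 0 <;> simp [hR0])
         all_goals first
           | rfl
           | omega
           | ((simp [show ¬ (L < 1) from by omega, show ¬ (R < 1) from by omega]) <;>
              (try rw [ih _ _ _ (by omega) (by omega)]) <;> (try ring_nf))
           | ((simp [show ¬ (L < 1) from by omega]) <;>
              (try rw [ih _ _ _ (by omega) (by omega)]) <;> (try ring_nf))
           | ((simp [show ¬ (R < 1) from by omega]) <;>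
              (try rw [ih _ _ _ (by omega) (by omega)]) <;> (try ring_nf))
           | (rw [ih _ _ _ (by omega) (by omega)]; ring_nf)
           | (rw [ih _ _ _ (by omega) (by omega)]
              simp [Bool.and_assoc, Bool.and_left_comm, Bool.and_comm]
              ring_nf)
           | simp_all
           | (exfalso; omega))

theorem zip_take_min (a b : List Char) :
    a.zip b = (a.take (min a.length b.length)).zip (b.take (min a.length b.length)) := by
  induction a generalizing b with
  | nil => simp
  | cons x xs ih =>
    cases b with
    | nil => simp
    | cons y ys =>
      simp only [List.length_cons, Nat.succ_min_succ, List.take_succ_cons, List.zip_cons_cons]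
      rw [← ih ys]

theorem xsum_zip (a b : List Char) (h : a.length = b.length) :
    xsum (a.zip b) = xcount a - xcount b := by
  have hgen : ∀ (a b : List Char), a.length = b.length →
      xsum (a.zip b) = (a.count 'X' : Int) - (b.count 'X' : Int) := by
    intro a
    induction a with
    | nil => intro b hb; cases b <;> simp_all [xsum]
    | cons x xs ih =>
      intro b hb
      cases b with
      | nil => simp at hb
      | cons y ys =>
        simp only [List.zip_cons_cons, xsum, List.count_cons]
        rw [ih ys (by simpa using hb)]
        by_cases hx : x = 'X' <;> by_cases hy : y = 'X' <;> simp [hx, hy] <;> ring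
  have hc : ∀ l : List Char, xcount l = (l.count 'X' : Int) := by
    intro l
    unfold xcount
    simpa using PySem.List.foldl_beq_add_one (l := l) (v := 'X') (a := (0:Int))
  rw [hgen a b h, hc, hc]

-- ===== VERDICT (by name: the statement is the Claim_ definition above) =====
theorem solution_467_1_spec : Claim_equal_solution_467_1 := by
  intro S E _
  unfold Spec_solution_467_1 solution_467_1 solution_467_1_alt
  have hn : min (PySem.Str.len S) (PySem.Str.len E)
      = ((min S.length E.length : Nat) : Int) := by
    simp only [PySem.Str.len_eq, String.length_toList]
    omega
  have hs : (PySem.Str.slice S none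
        (some ((min S.length E.length : Nat) : Int))).toList
      = S.toList.take (min S.length E.length) := by
    simp only [PySem.Str.toList_slice, PySem.Chars.slice_eq_listSlice]
    rw [PySem.List.slice_to_natCast]
  have he : (PySem.Str.slice E none
        (some ((min S.length E.length : Nat) : Int))).toList
      = E.toList.take (min S.length E.length) := by
    simp only [PySem.Str.toList_slice, PySem.Chars.slice_eq_listSlice]
    rw [PySem.List.slice_to_natCast]
  simp only [hn, hs, he]
  rw [zip_take_min S.toList E.toList]
  simp only [String.length_toList]
  rw [solution467Loop_eq _ 0 0 0 le_rfl le_rfl, List.zip_swap,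
    okLoop_eq_okCnt 'L' 'R' _ [], okLoop_eq_okCnt 'R' 'L' _ []]
  simp only [List.length_nil, Nat.cast_zero, zero_add]
  rw [xsum_zip _ _ (by simp)]
  by_cases hx : xcount (S.toList.take (min S.length E.length))
      = xcount (E.toList.take (min S.length E.length))
  · simp [hx, Bool.and_assoc, Bool.and_left_comm, Bool.and_comm]
  · simp [hx, sub_eq_zero]
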